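-- pv_equiv track=rewrite | github.com/ai-digital-architect/asyncapi_discovery | catalog_manager.py | _group_events_by_broker
-- ===== SOURCE A (Python) =====
-- from typing import List, Dict, Any, Optional
--
-- def _group_events_by_broker(events: List[Dict[str, Any]]) -> Dict[str, List[Dict[str, Any]]]:
--     """
--     Group events by broker type.
--
--     Args:
--         events: List of events
--
--     Returns:
--         Dictionary mapping broker type to list of events
--     """
--     brokers: Dict[str, List[Dict[str, Any]]] = {}
--
--     for event in events:
--         broker = event.get('broker', 'generic')
--         if broker not in brokers:
--             brokers[broker] = []
--         brokers[broker].append(event)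
--
--     return brokers
-- ===== SOURCE B (Python) =====
-- from typing import List, Dict, Any
--
--
-- def _group_events_by_broker(events: List[Dict[str, Any]]) -> Dict[str, List[Dict[str, Any]]]:
--     """Group events by broker type: collect the distinct broker keys in
--     first-appearance order, then gather each group with one filter pass."""
--     keys = list(dict.fromkeys(e.get('broker', 'generic') for e in events))
--     return {k: [e for e in events if e.get('broker', 'generic') == k] for k in keys}
-- ===== Notes on version B (the rewrite author's own statement) =====
-- stated objective: alternative
-- what changed: Replaces the single-pass dict-building loop with a two-phase comprehension: dedup the broker keys in first-appearance order, then build each group by filtering the event list per key.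
import Mathlib
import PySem

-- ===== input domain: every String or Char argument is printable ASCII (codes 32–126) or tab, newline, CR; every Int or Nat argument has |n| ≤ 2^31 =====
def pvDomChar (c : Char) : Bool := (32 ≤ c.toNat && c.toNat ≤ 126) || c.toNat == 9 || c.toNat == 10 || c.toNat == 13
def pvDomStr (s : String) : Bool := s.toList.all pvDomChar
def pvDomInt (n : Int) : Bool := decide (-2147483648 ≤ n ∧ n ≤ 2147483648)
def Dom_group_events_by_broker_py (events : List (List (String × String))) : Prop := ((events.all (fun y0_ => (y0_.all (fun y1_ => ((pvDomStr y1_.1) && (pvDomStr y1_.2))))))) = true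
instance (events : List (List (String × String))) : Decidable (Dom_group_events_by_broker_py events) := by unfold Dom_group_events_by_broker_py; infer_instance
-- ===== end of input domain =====

-- B groups the events in two phases (dedup the broker keys, then one filter pass per key)
-- instead of A's single accumulator-dict loop; alternative decomposition, same result.

-- event.get('broker', 'generic'): a Python dict is an association list, lookup is first match
def pvBrokerKey (event : List (String × String)) : String :=
  (PySem.Dict.mk event).getD "broker" "generic"

-- ===== PORT A =====
def group_events_by_broker_py (events : List (List (String × String))) : List (String × List (List (String × String))) :=
  (events.foldl
    (fun brokers event =>
      let broker := pvBrokerKey event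
      let brokers := if brokers.contains broker then brokers
                     else brokers.insert broker ([] : List (List (String × String)))
      brokers.modify broker [] (fun l => l ++ [event]))
    PySem.Dict.empty).items

-- ===== PORT B =====
def group_events_by_broker_py_alt (events : List (List (String × String))) : List (String × List (List (String × String))) :=
  (PySem.List.dedup (events.map pvBrokerKey)).map
    (fun k => (k, events.filter (fun e => pvBrokerKey e == k)))

-- ===== PRECONDITION & SPEC =====
def Spec_group_events_by_broker_py (events : List (List (String × String))) (out : List (String × List (List (String × String)))) : Prop := out = group_events_by_broker_py_alt events
instance (events : List (List (String × String))) (out : List (String × List (List (String × String)))) : Decidable (Spec_group_events_by_broker_py events out) := by unfold Spec_group_events_by_broker_py; infer_instance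

-- ===== CLAIM (what is proved, stated in full; the proofs are below) =====
def Claim_equal_group_events_by_broker_py : Prop := ∀ (events : List (List (String × String))), Dom_group_events_by_broker_py events → Spec_group_events_by_broker_py events (group_events_by_broker_py events)

-- ===== LEMMAS AND PROOFS =====

-- A's "ensure key, then append" step equals a plain modify (setdefault is absorbed by modify).
theorem pv_step_eq (d : PySem.Dict String (List (List (String × String))))
    (e : List (String × String)) :
    (if d.contains (pvBrokerKey e) then d
     else d.insert (pvBrokerKey e) ([] : List (List (String × String)))).modify
        (pvBrokerKey e) [] (fun l => l ++ [e])
    = d.modify (pvBrokerKey e) [] (fun l => l ++ [e]) := by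
  by_cases h : d.contains (pvBrokerKey e) = true
  · simp [h]
  · simp only [Bool.not_eq_true] at h
    rw [if_neg (by simp [h])]
    simp [PySem.Dict.modify, PySem.Dict.getD_insert_self, PySem.Dict.insert_insert_self,
      PySem.Dict.getD_of_not_contains d ([] : List (List (String × String))) h]

-- A's whole fold, rewritten to the plain modify loop.
theorem pv_fold_eq (events : List (List (String × String))) :
    events.foldl
      (fun brokers event =>
        let broker := pvBrokerKey event
        let brokers := if brokers.contains broker then brokers
                       else brokers.insert broker ([] : List (List (String × String)))
        brokers.modify broker [] (fun l => l ++ [event]))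
      PySem.Dict.empty
    = events.foldl (fun d e => d.modify (pvBrokerKey e) [] (fun l => l ++ [e]))
        PySem.Dict.empty := by
  have hf : (fun (brokers : PySem.Dict String (List (List (String × String)))) event =>
        let broker := pvBrokerKey event
        let brokers := if brokers.contains broker then brokers
                       else brokers.insert broker ([] : List (List (String × String)))
        brokers.modify broker [] (fun l => l ++ [event]))
      = fun d e => d.modify (pvBrokerKey e) [] (fun l => l ++ [e]) := by
    funext d e
    exact pv_step_eq d e
  rw [hf]

theorem pv_getD_fold (events : List (List (String × String))) (k : String) :
    (events.foldl (fun d e => d.modify (pvBrokerKey e) [] (fun l => l ++ [e]))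
        PySem.Dict.empty).getD k []
    = events.filter (fun e => pvBrokerKey e == k) := by
  have h := PySem.Dict.getD_foldl_modify_append
      (l := events.map (fun e => (pvBrokerKey e, e)))
      (d := (PySem.Dict.empty : PySem.Dict String (List (List (String × String))))) (c := k)
  rw [List.foldl_map] at h
  rw [h]
  simp [List.filter_map, Function.comp_def]

theorem group_events_by_broker_py_eq (events : List (List (String × String))) :
    group_events_by_broker_py events = group_events_by_broker_py_alt events := by
  unfold group_events_by_broker_py group_events_by_broker_py_alt
  rw [pv_fold_eq]
  set d := events.foldl (fun d e => d.modify (pvBrokerKey e) [] (fun l => l ++ [e]))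
      PySem.Dict.empty with hd
  have hnd : d.keys.Nodup := by
    rw [hd]
    exact PySem.Dict.nodup_keys_foldl_modify_key events pvBrokerKey []
      (fun _ e l => l ++ [e]) PySem.Dict.empty (by simp)
  have hkeys : d.keys = PySem.List.dedup (events.map pvBrokerKey) := by
    rw [hd]
    rw [PySem.Dict.keys_foldl_modify_key events pvBrokerKey [] (fun _ e l => l ++ [e])]
    simp [PySem.Set.update, PySem.Set.ofList, PySem.Dict.keys_empty, PySem.Set.empty]
  rw [PySem.Dict.items_eq_map_keys d hnd [], hkeys]
  refine List.map_congr_left ?_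
  intro k _
  rw [hd, pv_getD_fold]

-- ===== VERDICT (by name: the statement is the Claim_ definition above) =====
theorem group_events_by_broker_py_spec : Claim_equal_group_events_by_broker_py := by
  intro events _
  unfold Spec_group_events_by_broker_py
  exact group_events_by_broker_py_eq events
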